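-- pv_equiv track=rewrite | github.com/Some-Earth-2514/CSE-2050 | HW/HW 7 (14_3_23)/MagicSort.py | linear_scan
-- ===== SOURCE A (Python) =====
-- def linear_scan(L):
--     """
--     Perform a linear scan on the list L and return a value that denotes which (if any) edge cases apply.
--     """
--     # Is the list already sorted?
--     if all(L[i] <= L[i + 1] for i in range(len(L) - 1)):
--         return "already sorted"
--
--     # Are there at most 5 items out of place?
--     if sum(1 for i in range(len(L) - 1) if L[i] > L[i + 1]) <= 5:
--         return "insertion sort"
--
--     # Is the list reverse sorted?
--     if all(L[i] >= L[i + 1] for i in range(len(L) - 1)):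
--         return "reverse list"
--
--     return "quicksort"
-- ===== SOURCE B (Python) =====
-- def linear_scan(L):
--     """
--     Perform a linear scan on the list L and return a value that denotes which (if any) edge cases apply.
--     """
--     descents = 0
--     ascents = 0
--     for i in range(len(L) - 1):
--         if L[i] > L[i + 1]:
--             descents += 1
--         elif L[i] < L[i + 1]:
--             ascents += 1
--     if descents == 0:
--         return "already sorted"
--     elif descents <= 5:
--         return "insertion sort"
--     elif ascents == 0:
--         return "reverse list"
--     else:
--         return "quicksort"
-- ===== Notes on version B (the rewrite author's own statement) =====
-- stated objective: alternative
-- what changed: Replaces A's three separate scans (an all-ascending pass, a descent-counting pass, an all-descending pass) with one pass that counts descents and ascents and decides from the two counters.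
import Mathlib
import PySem

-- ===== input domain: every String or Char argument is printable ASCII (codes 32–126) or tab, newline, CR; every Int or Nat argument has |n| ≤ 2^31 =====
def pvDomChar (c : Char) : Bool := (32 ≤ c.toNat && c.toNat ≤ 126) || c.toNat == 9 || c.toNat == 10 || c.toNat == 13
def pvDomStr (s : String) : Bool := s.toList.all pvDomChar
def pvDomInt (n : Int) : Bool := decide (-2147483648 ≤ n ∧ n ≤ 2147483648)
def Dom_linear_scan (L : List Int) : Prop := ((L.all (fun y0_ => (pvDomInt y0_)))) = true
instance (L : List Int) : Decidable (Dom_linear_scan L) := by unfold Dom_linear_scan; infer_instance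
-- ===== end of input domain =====

-- B replaces A's up-to-three scans by one pass counting descents and ascents; same results on all inputs.

-- ===== PORT A =====
-- Three scans over range(len(L)-1), in A's order; indices produced by range are
-- always valid, so pyGetD with default 0 is exact here.
def linear_scan (L : List Int) : String :=
  let r := PySem.List.pyRange 0 ((L.length : Int) - 1) 1
  if r.all (fun i => PySem.List.pyGetD L i 0 ≤ PySem.List.pyGetD L (i + 1) 0) then
    "already sorted"
  else if (r.foldl (fun s i =>
      if PySem.List.pyGetD L i 0 > PySem.List.pyGetD L (i + 1) 0 then s + 1 else s) (0 : Int)) ≤ 5 then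
    "insertion sort"
  else if r.all (fun i => PySem.List.pyGetD L i 0 ≥ PySem.List.pyGetD L (i + 1) 0) then
    "reverse list"
  else
    "quicksort"

-- ===== PORT B =====
-- One fold accumulating (descents, ascents), then a decision on the two counters.
def linear_scan_alt (L : List Int) : String :=
  let p := (PySem.List.pyRange 0 ((L.length : Int) - 1) 1).foldl
    (fun (s : Int × Int) i =>
      if PySem.List.pyGetD L i 0 > PySem.List.pyGetD L (i + 1) 0 then (s.1 + 1, s.2)
      else if PySem.List.pyGetD L i 0 < PySem.List.pyGetD L (i + 1) 0 then (s.1, s.2 + 1)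
      else s) ((0 : Int), (0 : Int))
  if p.1 = 0 then "already sorted"
  else if p.1 ≤ 5 then "insertion sort"
  else if p.2 = 0 then "reverse list"
  else "quicksort"

-- ===== PRECONDITION & SPEC =====
def Spec_linear_scan (L : List Int) (out : String) : Prop := out = linear_scan_alt L
instance (L : List Int) (out : String) : Decidable (Spec_linear_scan L out) := by unfold Spec_linear_scan; infer_instance

-- ===== CLAIM (what is proved, stated in full; the proofs are below) =====
def Claim_equal_linear_scan : Prop := ∀ (L : List Int), Dom_linear_scan L → Spec_linear_scan L (linear_scan L)

-- ===== LEMMAS AND PROOFS =====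

-- A's counting fold equals the countP of the descent predicate.
theorem cntFold_eq_countP (p : Int → Prop) [DecidablePred p] :
    ∀ (xs : List Int) (s : Int),
      xs.foldl (fun s i => if p i then s + 1 else s) s = s + xs.countP (fun i => decide (p i)) := by
  intro xs
  induction xs with
  | nil => intro s; simp
  | cons x xs ih =>
    intro s
    by_cases hx : p x <;> simp [hx, ih] <;> omega

-- B's pair fold is the pair of the two countPs.
theorem pairFold_eq (p q : Int → Prop) [DecidablePred p] [DecidablePred q]
    (hpq : ∀ i, p i → ¬ q i) :
    ∀ (xs : List Int) (a b : Int),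
      xs.foldl (fun (s : Int × Int) i =>
          if p i then (s.1 + 1, s.2) else if q i then (s.1, s.2 + 1) else s) (a, b)
        = (a + xs.countP (fun i => decide (p i)), b + xs.countP (fun i => decide (q i))) := by
  intro xs
  induction xs with
  | nil => intro a b; simp
  | cons x xs ih =>
    intro a b
    by_cases hx : p x
    · have hq : ¬ q x := hpq x hx
      simp [hx, hq, ih]; omega
    · by_cases hq : q x <;> simp [hx, hq, ih] <;> omega

-- ===== VERDICT (by name: the statement is the Claim_ definition above) =====
theorem linear_scan_spec : Claim_equal_linear_scan := by
  intro L _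
  unfold Spec_linear_scan linear_scan linear_scan_alt
  set r := PySem.List.pyRange 0 ((L.length : Int) - 1) 1 with hr
  have hpair := pairFold_eq
      (fun i => PySem.List.pyGetD L i 0 > PySem.List.pyGetD L (i + 1) 0)
      (fun i => PySem.List.pyGetD L i 0 < PySem.List.pyGetD L (i + 1) 0)
      (fun i h h' => absurd h' (not_lt_of_gt h)) r 0 0
  have hcnt := cntFold_eq_countP
      (fun i => PySem.List.pyGetD L i 0 > PySem.List.pyGetD L (i + 1) 0) r 0
  simp only [hpair, hcnt, Int.zero_add]
  set d : Nat := r.countP (fun i => decide (PySem.List.pyGetD L i 0 > PySem.List.pyGetD L (i + 1) 0)) with hd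
  set a : Nat := r.countP (fun i => decide (PySem.List.pyGetD L i 0 < PySem.List.pyGetD L (i + 1) 0)) with ha
  have hall1 : (r.all (fun i => PySem.List.pyGetD L i 0 ≤ PySem.List.pyGetD L (i + 1) 0)) = true ↔ d = 0 := by
    rw [hd, List.countP_eq_zero, List.all_eq_true]
    simp only [decide_eq_true_eq, gt_iff_lt, not_lt]
  have hall2 : (r.all (fun i => PySem.List.pyGetD L i 0 ≥ PySem.List.pyGetD L (i + 1) 0)) = true ↔ a = 0 := by
    rw [ha, List.countP_eq_zero, List.all_eq_true]
    simp only [decide_eq_true_eq, ge_iff_le, not_lt]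
  by_cases h1 : d = 0
  · simp [hall1.mpr h1, h1]
  · have h1' : ¬ (r.all (fun i => PySem.List.pyGetD L i 0 ≤ PySem.List.pyGetD L (i + 1) 0)) = true := by
      simp only [hall1]; exact h1
    by_cases h2 : (d : Int) ≤ 5
    · simp [h1', h2, h1]
    · by_cases h3 : a = 0
      · simp [h1', h2, h1, hall2.mpr h3, h3]
      · have h3' : ¬ (r.all (fun i => PySem.List.pyGetD L i 0 ≥ PySem.List.pyGetD L (i + 1) 0)) = true := by
          simp only [hall2]; exact h3
        simp [h1', h2, h1, h3', h3]
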